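-- pv_equiv track=rewrite | github.com/Samviljan/Viikinkitapahtumat_webandmobile | backend/translation_service.py | _pick_source
-- ===== SOURCE A (Python) =====
-- from typing import Optional
--
-- def _pick_source(values: dict[str, str]) -> Optional[str]:
--     """Return language code with the longest non-empty value, prefer fi > en > sv > others."""
--     pref_order = ("fi", "en", "sv", "da", "de", "et", "pl")
--     candidates = [(lang, (values.get(lang) or "").strip()) for lang in pref_order]
--     candidates = [(lang, v) for lang, v in candidates if v]
--     if not candidates:
--         return None
--     candidates.sort(key=lambda x: -len(x[1]))
--     return candidates[0][0]
-- ===== SOURCE B (Python) =====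
-- from typing import Optional
--
-- def _pick_source(values: dict[str, str]) -> Optional[str]:
--     """Return language code with the longest non-empty value, prefer fi > en > sv > others."""
--     best_lang: Optional[str] = None
--     best_len = 0
--     for lang in ("fi", "en", "sv", "da", "de", "et", "pl"):
--         v = (values.get(lang) or "").strip()
--         if v and len(v) > best_len:
--             best_lang = lang
--             best_len = len(v)
--     return best_lang
-- ===== Notes on version B (the rewrite author's own statement) =====
-- stated objective: simpler
-- what changed: Replaces the build-candidates/filter/stable-sort pipeline with a single pass over the preference order that tracks the best language and a strictly-greater length, which reproduces the stable sort's tie-breaking.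
import Mathlib
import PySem

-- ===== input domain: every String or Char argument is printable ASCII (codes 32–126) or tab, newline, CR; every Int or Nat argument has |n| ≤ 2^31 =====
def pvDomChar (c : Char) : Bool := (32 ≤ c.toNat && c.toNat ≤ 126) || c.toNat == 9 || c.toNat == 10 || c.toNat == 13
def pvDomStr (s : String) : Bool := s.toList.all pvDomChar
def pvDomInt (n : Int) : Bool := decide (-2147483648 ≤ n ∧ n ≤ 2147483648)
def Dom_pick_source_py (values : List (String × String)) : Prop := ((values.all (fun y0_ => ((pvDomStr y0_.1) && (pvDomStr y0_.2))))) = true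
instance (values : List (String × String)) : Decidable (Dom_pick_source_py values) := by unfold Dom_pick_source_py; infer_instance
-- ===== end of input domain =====

-- B replaces A's build/filter/stable-sort pipeline with one pass tracking the strictly longest value; objective: simpler.

-- the fixed preference tuple, shared verbatim by both Pythons
def pickPrefOrder : List String := ["fi", "en", "sv", "da", "de", "et", "pl"]

-- ===== PORT A =====
def pick_source_py (values : List (String × String)) : Option String :=
  let candidates := pickPrefOrder.map (fun lang =>
    (lang, PySem.Str.strip (((PySem.Dict.mk values).get? lang).getD "")))
  let candidates := candidates.filter (fun p => decide (p.2 ≠ ""))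
  if candidates = [] then none
  else
    match (PySem.List.sorted candidates (fun p => -(PySem.Str.len p.2))).head? with
    | some p => some p.1
    | none => none

-- ===== PORT B =====
def pick_source_py_alt (values : List (String × String)) : Option String :=
  (pickPrefOrder.foldl
    (fun (st : Option String × Int) (lang : String) =>
      let v := PySem.Str.strip (((PySem.Dict.mk values).get? lang).getD "")
      if v ≠ "" ∧ PySem.Str.len v > st.2 then (some lang, PySem.Str.len v) else st)
    (none, 0)).1

-- ===== PRECONDITION & SPEC =====
def Spec_pick_source_py (values : List (String × String)) (out : Option String) : Prop := out = pick_source_py_alt values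
instance (values : List (String × String)) (out : Option String) : Decidable (Spec_pick_source_py values out) := by unfold Spec_pick_source_py; infer_instance

-- ===== CLAIM (what is proved, stated in full; the proofs are below) =====
def Claim_equal_pick_source_py : Prop := ∀ (values : List (String × String)), Dom_pick_source_py values → Spec_pick_source_py values (pick_source_py values)

-- ===== LEMMAS AND PROOFS =====

-- B's loop body, on an already-looked-up (lang, value) pair
def pvStep (st : Option String × Int) (p : String × String) : Option String × Int :=
  if p.2 ≠ "" ∧ PySem.Str.len p.2 > st.2 then (some p.1, PySem.Str.len p.2) else st

-- the insertion step of A's stable sort (key = -len of the value)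
def pvIns (acc : List (String × String)) (x : String × String) : List (String × String) :=
  PySem.List.insertBy (fun a b => decide ((-(PySem.Str.len a.2) : Int) < -(PySem.Str.len b.2))) x acc

-- invariant: B's state mirrors the head of A's sorted accumulator
def pvRel (acc : List (String × String)) (st : Option String × Int) : Prop :=
  match acc with
  | [] => st = (none, 0)
  | h :: _ => st = (some h.1, PySem.Str.len h.2)

theorem pvLen_pos (s : String) (h : s ≠ "") : 0 < PySem.Str.len s := by
  rw [PySem.Str.len_eq]
  have hnil : s.toList ≠ [] := fun hn => h (String.toList_eq_nil_iff.mp hn)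
  have := List.length_pos_iff.mpr hnil
  omega

theorem pvRel_fold (fs : List (String × String)) (hfs : ∀ p ∈ fs, p.2 ≠ "")
    (acc : List (String × String)) (st : Option String × Int) (hrel : pvRel acc st) :
    pvRel (fs.foldl pvIns acc) (fs.foldl pvStep st) := by
  induction fs generalizing acc st with
  | nil => exact hrel
  | cons x fs ih =>
    simp only [List.foldl_cons]
    refine ih (fun p hp => hfs p (List.mem_cons_of_mem _ hp)) _ _ ?_
    have hx : x.2 ≠ "" := hfs x (List.mem_cons_self)
    cases acc with
    | nil =>
      have hst : st = (none, 0) := hrel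
      subst hst
      have hpos : 0 < x.2.length := by
        have := pvLen_pos _ hx
        simp [PySem.Str.len_eq] at this
        simpa using this
      simp [pvIns, pvStep, PySem.List.insertBy, pvRel, hx, hpos]
    | cons h t =>
      have hst : st = (some h.1, PySem.Str.len h.2) := hrel
      subst hst
      by_cases hlt : h.2.length < x.2.length
      · simp [pvIns, pvStep, PySem.List.insertBy, pvRel, hx, hlt]
      · simp [pvIns, pvStep, PySem.List.insertBy, pvRel, hx, hlt]

theorem pvFold_filter (l : List (String × String)) (st : Option String × Int) :
    l.foldl pvStep st = (l.filter (fun p => decide (p.2 ≠ ""))).foldl pvStep st := by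
  induction l generalizing st with
  | nil => rfl
  | cons x l ih =>
    by_cases hx : x.2 = ""
    · have hskip : pvStep st x = st := by
        simp [pvStep, hx]
      simp [hx, hskip, ih]
    · simp [hx, ih]

theorem pvMain (cs : List (String × String)) :
    (if cs.filter (fun p => decide (p.2 ≠ "")) = [] then none
     else
       match (PySem.List.sorted (cs.filter (fun p => decide (p.2 ≠ "")))
           (fun p => -(PySem.Str.len p.2))).head? with
       | some p => some p.1
       | none => none)
    = (cs.foldl pvStep ((none : Option String), (0 : Int))).1 := by
  rw [pvFold_filter]
  set fs := cs.filter (fun p => decide (p.2 ≠ "")) with hfsdef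
  have hmem : ∀ p ∈ fs, p.2 ≠ "" := by
    intro p hp
    have := List.of_mem_filter hp
    simpa using this
  have hrel : pvRel (fs.foldl pvIns []) (fs.foldl pvStep (none, 0)) :=
    pvRel_fold fs hmem [] (none, 0) rfl
  have hsortedeq : PySem.List.sorted fs (fun p => -(PySem.Str.len p.2)) = fs.foldl pvIns [] := by
    rw [PySem.List.sorted_eq_foldl_insertBy]
    rfl
  by_cases hfs : fs = []
  · rw [if_pos hfs, hfs]
    rfl
  · rw [if_neg hfs]
    have hne : PySem.List.sorted fs (fun p => -(PySem.Str.len p.2)) ≠ [] := by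
      rw [Ne, PySem.List.sorted_eq_nil_iff]
      exact hfs
    cases hacc : PySem.List.sorted fs (fun p => -(PySem.Str.len p.2)) with
    | nil => exact absurd hacc hne
    | cons a r =>
      rw [hsortedeq] at hacc
      rw [hacc] at hrel
      have hst : fs.foldl pvStep (none, 0) = (some a.1, PySem.Str.len a.2) := hrel
      rw [hst]
      rfl

-- ===== VERDICT (by name: the statement is the Claim_ definition above) =====
theorem pick_source_py_spec : Claim_equal_pick_source_py := by
  intro values _
  unfold Spec_pick_source_py
  have hB : pick_source_py_alt values =
      ((pickPrefOrder.map (fun lang =>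
        (lang, PySem.Str.strip (((PySem.Dict.mk values).get? lang).getD "")))).foldl
          pvStep (none, 0)).1 := by
    unfold pick_source_py_alt
    rw [List.foldl_map]
    rfl
  rw [hB]
  exact pvMain _
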